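-- pv_equiv track=rewrite | github.com/studosi-fer/TEOINF | labosi/lab-1/2010-11/by_ab31/ekstra/hamming.py | mnozenje_matrica
-- ===== SOURCE A (Python) =====
-- def mnozenje_matrica(g,y):
-- 	kod=[]
-- 	for i in range(0, len(g[0])):
-- 		x=0
-- 		for j in range(0,len(g)):
-- 			x+=int(y[j])*int(g[j][i])
-- 		kod.append(str(x%2))
-- 		x=0
-- 	return kod
-- ===== SOURCE B (Python) =====
-- def mnozenje_matrica(g, y):
--     # Row-major accumulation: one vector of column partial sums, updated per row.
--     acc = [0] * len(g[0])
--     for j, row in enumerate(g):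
--         yj = int(y[j])
--         for i in range(len(acc)):
--             acc[i] += yj * int(row[i])
--     return [str(v % 2) for v in acc]
-- ===== Notes on version B (the rewrite author's own statement) =====
-- stated objective: alternative
-- what changed: Swapped the loop nest: instead of recomputing one scalar per output column by scanning all rows (column-major), B keeps a full vector of column partial sums and updates every entry once per row (row-major), reducing mod 2 only at the end.
-- outside the precondition, e.g. on mnozenje_matrica([[], [1]], []): A returns [], B raises IndexError
import Mathlib
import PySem

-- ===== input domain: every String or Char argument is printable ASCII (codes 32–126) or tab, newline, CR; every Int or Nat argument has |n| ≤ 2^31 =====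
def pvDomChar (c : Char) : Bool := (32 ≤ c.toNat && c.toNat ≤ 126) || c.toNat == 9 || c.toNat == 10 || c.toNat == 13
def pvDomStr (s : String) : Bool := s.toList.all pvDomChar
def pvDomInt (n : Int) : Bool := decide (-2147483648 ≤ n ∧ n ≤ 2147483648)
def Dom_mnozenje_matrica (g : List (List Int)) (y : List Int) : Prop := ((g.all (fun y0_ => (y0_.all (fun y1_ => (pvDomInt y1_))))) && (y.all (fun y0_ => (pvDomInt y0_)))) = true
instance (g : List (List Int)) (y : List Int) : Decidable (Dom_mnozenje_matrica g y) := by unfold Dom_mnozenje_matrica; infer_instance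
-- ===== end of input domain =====

-- B replaces A's column-major scalar accumulation by row-major updates of a vector of
-- column partial sums (alternative decomposition, same asymptotic cost).


-- ===== PORT A =====
-- Literal port of A; pyGetD defaults are exact on Pre_ (all indices in range).
def mnozenje_matrica (g : List (List Int)) (y : List Int) : List String :=
  (PySem.List.pyRange 0 ((g.headD []).length : Int) 1).foldl
    (fun kod i =>
      let x : Int :=
        (PySem.List.pyRange 0 (g.length : Int) 1).foldl
          (fun x j => x + PySem.List.pyGetD y j 0 * PySem.List.pyGetD (PySem.List.pyGetD g j []) i 0) 0
      kod ++ [PySem.Int.toStr (PySem.Int.mod x 2)]) []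

-- ===== PORT B =====
-- one row's update of the accumulator: acc[i] += yj * row[i] for each i
def pvRowStep (y : List Int) (acc : List Int) (jr : Int × List Int) : List Int :=
  acc.mapIdx (fun i v => v + PySem.List.pyGetD y jr.1 0 * PySem.List.pyGetD jr.2 (i : Int) 0)

def mnozenje_matrica_alt (g : List (List Int)) (y : List Int) : List String :=
  (((PySem.List.enumerate g).foldl (pvRowStep y)
      (List.replicate (g.headD []).length 0)).map
    (fun v => PySem.Int.toStr (PySem.Int.mod v 2)))

-- ===== PRECONDITION & SPEC =====
-- Pre_ excludes the inputs where Python A raises IndexError (empty g, y shorter than g,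
-- a row shorter than g[0]); when g[0] is empty and y is shorter than g, A accidentally
-- returns [] without ever reading y, while B's row loop reads y[j] and raises there.
def Pre_mnozenje_matrica (g : List (List Int)) (y : List Int) : Prop :=
  g ≠ [] ∧ g.length ≤ y.length ∧ ∀ r ∈ g, (g.headD []).length ≤ r.length
instance (g : List (List Int)) (y : List Int) : Decidable (Pre_mnozenje_matrica g y) := by unfold Pre_mnozenje_matrica; infer_instance
def pvWitness_mnozenje_matrica : List (List Int) × List Int := ([[1, 0], [1, 1]], [1, 1])

def Spec_mnozenje_matrica (g : List (List Int)) (y : List Int) (out : List String) : Prop := out = mnozenje_matrica_alt g y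
instance (g : List (List Int)) (y : List Int) (out : List String) : Decidable (Spec_mnozenje_matrica g y out) := by unfold Spec_mnozenje_matrica; infer_instance

-- ===== CLAIM (what is proved, stated in full; the proofs are below) =====
def Claim_equal_mnozenje_matrica : Prop := ∀ (g : List (List Int)) (y : List Int), Dom_mnozenje_matrica g y → Pre_mnozenje_matrica g y → Spec_mnozenje_matrica g y (mnozenje_matrica g y)

-- ===== LEMMAS AND PROOFS =====

-- sum over the rows (enumerated from s) of y[j]*row[i]: the value of output column i
def pvColC (y : List Int) (g : List (List Int)) (s : Int) (i : Int) : Int :=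
  ((PySem.List.enumerate g s).map
    (fun jr => PySem.List.pyGetD y jr.1 0 * PySem.List.pyGetD jr.2 i 0)).sum

theorem pvColC_nil (y : List Int) (s i : Int) : pvColC y [] s i = 0 := by
  simp [pvColC, PySem.List.enumerate]

theorem pvColC_cons (y : List Int) (r : List Int) (g : List (List Int)) (s i : Int) :
    pvColC y (r :: g) s i
      = PySem.List.pyGetD y s 0 * PySem.List.pyGetD r i 0 + pvColC y g (s + 1) i := by
  simp [pvColC, PySem.List.enumerate_cons]

-- A's result in closed form
theorem pvA_eq (g : List (List Int)) (y : List Int) :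
    mnozenje_matrica g y
      = (PySem.List.pyRange 0 ((g.headD []).length : Int) 1).map
          (fun i => PySem.Int.toStr (PySem.Int.mod (pvColC y g 0 i) 2)) := by
  unfold mnozenje_matrica
  rw [PySem.List.foldl_append_singleton_eq_map
        (f := fun i => PySem.Int.toStr (PySem.Int.mod
          ((PySem.List.pyRange 0 (g.length : Int) 1).foldl
            (fun x j => x + PySem.List.pyGetD y j 0 *
              PySem.List.pyGetD (PySem.List.pyGetD g j []) i 0) 0) 2))]
  simp only [List.nil_append]
  refine List.map_congr_left (fun i _ => ?_)
  congr 2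
  rw [PySem.List.foldl_add]
  have h := PySem.List.enumerate_eq_map_pyRange g ([] : List Int)
  simp only [pvColC, h, List.map_map, PySem.List.len, zero_add]
  rfl

-- B's loop invariant: folding the rows adds the column sums pointwise to the accumulator
theorem pvB_inv (y : List Int) (g : List (List Int)) (s : Int) (acc : List Int) :
    (PySem.List.enumerate g s).foldl (pvRowStep y) acc
      = acc.mapIdx (fun k v => v + pvColC y g s (k : Int)) := by
  induction g generalizing s acc with
  | nil =>
      simp only [PySem.List.enumerate, List.foldl_nil, pvColC_nil, add_zero]
      refine (List.ext_getElem (by simp) ?_).symm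
      intro k h1 h2
      simp [List.getElem_mapIdx]
  | cons r g ih =>
      rw [PySem.List.enumerate_cons, List.foldl_cons, ih]
      show (pvRowStep y acc (s, r)).mapIdx _ = _
      unfold pvRowStep
      rw [List.mapIdx_mapIdx]
      congr 1
      funext k v
      simp [Function.comp, pvColC_cons, add_assoc]

theorem pvMapIdx_replicate {β : Type} (n : Nat) (c : Int) (f : Nat → Int → β) :
    (List.replicate n c).mapIdx f = (List.range n).map (fun k => f k c) := by
  apply List.ext_getElem
  · simp
  · intro k h1 h2
    simp [List.getElem_mapIdx]

-- B's result in the same closed form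
theorem pvB_eq (g : List (List Int)) (y : List Int) :
    mnozenje_matrica_alt g y
      = (PySem.List.pyRange 0 ((g.headD []).length : Int) 1).map
          (fun i => PySem.Int.toStr (PySem.Int.mod (pvColC y g 0 i) 2)) := by
  unfold mnozenje_matrica_alt
  rw [pvB_inv, pvMapIdx_replicate, List.map_map, PySem.List.pyRange_zero_nat, List.map_map]
  simp [Function.comp]

-- ===== VERDICT (by name: the statement is the Claim_ definition above) =====
theorem mnozenje_matrica_spec : Claim_equal_mnozenje_matrica := by
  intro g y _ _
  unfold Spec_mnozenje_matrica
  rw [pvA_eq, pvB_eq]
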